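-- pv_equiv track=rewrite | github.com/SimonLangowski/RNSMont | scripts/rns_helpers.py | rns_precompute
-- ===== SOURCE A (Python) =====
-- def total_modulus(moduli):
--     modulus = 1 # Compute the big modulus
--     for m in moduli:
--         assert(m != 0)
--         modulus *= m
--     return modulus
--
-- def rns_precompute(moduli):
--     modulus = total_modulus(moduli)
--     precomputed = []
--     for m in moduli:
--         rest = modulus // m # 0 mod all the other moduli
--         inverse = pow(rest % m, -1, m) # factor to make 1 mod this moduli
--         icrt_val = (rest * inverse) % modulus # combine
--         precomputed.append(icrt_val)
--     return precomputed
-- ===== SOURCE B (Python) =====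
-- def rns_precompute(moduli):
--     # backward pass: suffix[i] = product of moduli[i:]
--     n = len(moduli)
--     suffix = [1] * (n + 1)
--     for i in range(n - 1, -1, -1):
--         m = moduli[i]
--         assert m != 0
--         suffix[i] = m * suffix[i + 1]
--     modulus = suffix[0]
--     # forward pass: running prefix product; rest = product of all other moduli
--     out = []
--     prefix = 1
--     for i in range(n):
--         m = moduli[i]
--         rest = prefix * suffix[i + 1]
--         inverse = pow(rest % m, -1, m)
--         out.append((rest * inverse) % modulus)
--         prefix *= m
--     return out
-- ===== Notes on version B (the rewrite author's own statement) =====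
-- stated objective: alternative
-- what changed: Replaces A's per-element big-integer division modulus//m by a backward suffix-product pass plus a forward running-prefix pass, so each 'rest' (product of the other moduli) is obtained as prefix*suffix[i+1] without any division.
import Mathlib
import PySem

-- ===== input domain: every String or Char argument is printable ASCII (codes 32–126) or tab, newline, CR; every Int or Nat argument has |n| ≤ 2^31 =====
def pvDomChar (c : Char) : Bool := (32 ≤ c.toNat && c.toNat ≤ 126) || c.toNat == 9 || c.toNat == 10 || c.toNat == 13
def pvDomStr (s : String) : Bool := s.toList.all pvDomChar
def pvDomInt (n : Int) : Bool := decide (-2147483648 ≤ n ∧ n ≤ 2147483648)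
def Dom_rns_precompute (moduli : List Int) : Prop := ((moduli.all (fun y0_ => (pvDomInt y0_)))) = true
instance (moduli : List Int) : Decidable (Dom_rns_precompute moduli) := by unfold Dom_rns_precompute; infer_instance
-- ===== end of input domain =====

-- B replaces A's per-element division modulus//m by a backward suffix-product pass and a
-- forward running-prefix pass (rest = prefix * suffix[i+1]); alternative decomposition, no division.

-- hand port of Python's pow(a, -1, m): the modular inverse, exact when m ≠ 0 and gcd(a,m) = 1
-- (guaranteed by Pre_); shared by both ports exactly as pow is shared by both Pythons.
def pyInvMod (a m : Int) : Int := PySem.Int.mod (Int.gcdA a m) m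

-- ===== PORT A =====
def total_modulus (moduli : List Int) : Int :=
  moduli.foldl (fun modulus m => modulus * m) 1

def rns_precompute (moduli : List Int) : List Int :=
  let modulus := total_modulus moduli
  moduli.foldl (fun precomputed m =>
    let rest := PySem.Int.floordiv modulus m
    let inverse := pyInvMod (PySem.Int.mod rest m) m
    precomputed ++ [PySem.Int.mod (rest * inverse) modulus]) []

-- ===== PORT B =====
-- backward pass: suffixProds ms = [prod ms[0:], prod ms[1:], …, 1]
def suffixProds : List Int → List Int
  | [] => [1]
  | m :: ms => let s := suffixProds ms; (m * s.headD 1) :: s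

-- forward pass: carries the running prefix product and the remaining suffix array
def bloop (modulus : Int) : List Int → List Int → Int → List Int
  | [], _, _ => []
  | m :: ms, suf, pref =>
    let rest := pref * suf.headD 1
    let inverse := pyInvMod (PySem.Int.mod rest m) m
    PySem.Int.mod (rest * inverse) modulus :: bloop modulus ms suf.tail (pref * m)

def rns_precompute_alt (moduli : List Int) : List Int :=
  let suffix := suffixProds moduli
  bloop (suffix.headD 1) moduli suffix.tail 1

-- ===== PRECONDITION & SPEC =====
-- A raises AssertionError on a zero modulus and ValueError (pow not invertible) when two
-- moduli share a common factor; Pre_ admits exactly the inputs where A returns.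
def Pre_rns_precompute (moduli : List Int) : Prop :=
  (∀ m ∈ moduli, m ≠ 0) ∧ List.Pairwise (fun a b => Int.gcd a b = 1) moduli
instance (moduli : List Int) : Decidable (Pre_rns_precompute moduli) := by
  unfold Pre_rns_precompute; infer_instance

def pvWitness_rns_precompute : List Int := [3, 5, 7]

def Spec_rns_precompute (moduli : List Int) (out : List Int) : Prop := out = rns_precompute_alt moduli
instance (moduli : List Int) (out : List Int) : Decidable (Spec_rns_precompute moduli out) := by unfold Spec_rns_precompute; infer_instance

-- ===== CLAIM (what is proved, stated in full; the proofs are below) =====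
def Claim_equal_rns_precompute : Prop := ∀ (moduli : List Int), Dom_rns_precompute moduli → Pre_rns_precompute moduli → Spec_rns_precompute moduli (rns_precompute moduli)

-- ===== LEMMAS AND PROOFS =====

-- exact division: floordiv (c * m) m = c for m ≠ 0
theorem floordiv_mul_cancel (c m : Int) (hm : m ≠ 0) :
    PySem.Int.floordiv (c * m) m = c := by
  have h0 : PySem.Int.mod (c * m) m = 0 :=
    (PySem.Int.mod_eq_zero_iff_dvd _ _).2 ⟨c, by ring⟩
  have h := PySem.Int.floordiv_mul_add_mod (c * m) m
  rw [h0, add_zero] at h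
  exact mul_right_cancel₀ hm h

theorem suffixProds_headD (l : List Int) : (suffixProds l).headD 1 = l.prod := by
  induction l with
  | nil => simp [suffixProds]
  | cons m ms ih =>
    simp only [suffixProds, List.headD_cons, ih, List.prod_cons]

theorem foldl_mul_eq (l : List Int) : ∀ a : Int, l.foldl (fun x m => x * m) a = a * l.prod := by
  induction l with
  | nil => intro a; simp
  | cons m ms ih => intro a; simp [List.foldl_cons, ih, List.prod_cons]; ring

theorem foldl_append_eq_map (f : Int → Int) (l : List Int) :
    ∀ init : List Int, l.foldl (fun acc m => acc ++ [f m]) init = init ++ l.map f := by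
  induction l with
  | nil => intro init; simp
  | cons m ms ih => intro init; simp [List.foldl_cons, ih]

theorem bloop_eq_map (M : Int) :
    ∀ (ms : List Int) (pref : Int), (∀ m ∈ ms, m ≠ 0) → M = pref * ms.prod →
    bloop M ms (suffixProds ms).tail pref =
      ms.map (fun m =>
        let rest := PySem.Int.floordiv M m
        PySem.Int.mod (rest * pyInvMod (PySem.Int.mod rest m) m) M) := by
  intro ms
  induction ms with
  | nil => intro pref _ _; simp [bloop]
  | cons m ms ih =>
    intro pref hnz hM
    have hm : m ≠ 0 := hnz m (by simp)
    have htail : (suffixProds (m :: ms)).tail = suffixProds ms := by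
      simp [suffixProds]
    have hrest : pref * (suffixProds ms).headD 1 = PySem.Int.floordiv M m := by
      rw [suffixProds_headD, hM, List.prod_cons]
      rw [show pref * (m * ms.prod) = (pref * ms.prod) * m by ring,
        floordiv_mul_cancel _ _ hm]
    calc bloop M (m :: ms) (suffixProds (m :: ms)).tail pref
        = PySem.Int.mod ((pref * (suffixProds ms).headD 1) *
            pyInvMod (PySem.Int.mod (pref * (suffixProds ms).headD 1) m) m) M ::
            bloop M ms (suffixProds ms).tail (pref * m) := by
          rw [htail]
          cases ms with
          | nil => simp [bloop, suffixProds]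
          | cons m' ms' => simp [bloop, suffixProds]
      _ = _ := by
          rw [hrest, ih (pref * m) (fun x hx => hnz x (by simp [hx]))
            (by rw [hM, List.prod_cons]; ring)]
          simp [List.map_cons]

-- ===== VERDICT (by name: the statement is the Claim_ definition above) =====
theorem rns_precompute_spec : Claim_equal_rns_precompute := by
  intro moduli _ hpre
  show rns_precompute moduli = rns_precompute_alt moduli
  have hM : total_modulus moduli = moduli.prod := by
    unfold total_modulus; rw [foldl_mul_eq, one_mul]
  have hB : rns_precompute_alt moduli =
      bloop ((suffixProds moduli).headD 1) moduli (suffixProds moduli).tail 1 := rfl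
  rw [hB, suffixProds_headD,
    bloop_eq_map moduli.prod moduli 1 hpre.1 (by ring)]
  unfold rns_precompute
  rw [foldl_append_eq_map, List.nil_append, hM]
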